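-- pv_equiv track=rewrite | github.com/differentname123/auto_video | utils/common_utils.py | get_remaining_segments
-- ===== SOURCE A (Python) =====
-- def get_remaining_segments(duration_ms, remove_segments, min_duration=1000):
--     """
--     计算删除指定时间段后的视频保留区间（左闭右开区间 [start, end)）。
--
--     约定：
--       - 视频范围为 [0, duration_ms)
--       - remove_segments 是一组 (start, end)，可能无序、重叠或超出边界
--       - 返回值为按时间升序的非重叠保留区间列表 [(start, end), ...]
--
--     参数：
--       duration_ms    - 视频总时长（毫秒或秒），应为非负数
--       remove_segments - 要删除的时间段列表，例如 [(10, 30), (60, 90)]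
--       min_duration    - [新增] 最小保留片段时长，默认为 0.1。
--                         用于过滤因浮点数精度导致的极微小片段（防止 FFmpeg 报错 -ss >= -to）
--     """
--     # 边界与空输入处理
--     if duration_ms <= 0:
--         return []
--     if not remove_segments:
--         # 如果总时长也小于最小阈值，理论上不应保留，但在空删除列表情况下通常保留原视频
--         return [(0, duration_ms)]
--
--     # 1) 规范化并裁剪删除区间到视频范围内，丢弃无效区间
--     cleaned = []
--     for s, e in remove_segments:
--         # 裁剪到 [0, duration_ms]
--         if s < 0:
--             s = 0
--         if e > duration_ms:
--             e = duration_ms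
--         # 只保留有效区间（开始 < 结束）
--         if s < e:
--             cleaned.append((s, e))
--
--     if not cleaned:
--         return [(0, duration_ms)]
--
--     # 2) 按起点排序
--     cleaned.sort(key=lambda seg: seg[0])
--
--     # 3) 合并重叠或相邻的删除区间
--     merged = []
--     cur_start, cur_end = cleaned[0]
--     for s, e in cleaned[1:]:
--         if s <= cur_end:        # 重叠或相邻（s == cur_end 也当作合并处理）
--             # 扩展当前区间右端点
--             if e > cur_end:
--                 cur_end = e
--         else:
--             merged.append((cur_start, cur_end))
--             cur_start, cur_end = s, e
--     merged.append((cur_start, cur_end))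
--
--     # 4) 计算补集：保留区间
--     remaining = []
--     prev_end = 0
--     for s, e in merged:
--         # 【修改点】只有当片段长度大于阈值时才保留，避免浮点数精度产生 0 秒片段
--         if s - prev_end >= min_duration:
--             remaining.append((prev_end, s))
--         prev_end = e
--
--     # 视频末尾还有剩余
--     # 【修改点】同上，检查尾部片段长度
--     if duration_ms - prev_end >= min_duration:
--         remaining.append((prev_end, duration_ms))
--
--     return remaining
-- ===== SOURCE B (Python) =====
-- def get_remaining_segments(duration_ms, remove_segments, min_duration=1000):
--     # One fused pass: no intermediate merged list; a running max of clipped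
--     # end points yields each gap directly. Return value only (no mutation).
--     if duration_ms <= 0:
--         return []
--     if not remove_segments:
--         return [(0, duration_ms)]
--     cleaned = [(max(s, 0), min(e, duration_ms))
--                for s, e in remove_segments if max(s, 0) < min(e, duration_ms)]
--     if not cleaned:
--         return [(0, duration_ms)]
--     cleaned.sort(key=lambda seg: seg[0])
--     (s0, e0), rest = cleaned[0], cleaned[1:]
--     remaining = [(0, s0)] if s0 >= min_duration else []
--     prev = e0
--     for s, e in rest:
--         if s > prev and s - prev >= min_duration:
--             remaining.append((prev, s))
--         prev = max(prev, e)
--     if duration_ms - prev >= min_duration: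
--         remaining.append((prev, duration_ms))
--     return remaining
-- ===== Notes on version B (the rewrite author's own statement) =====
-- stated objective: simpler
-- what changed: Replaces the merge-pass that builds an intermediate merged list plus a second complement-pass by a single fused sweep over the sorted clipped intervals that maintains a running max end and emits each kept gap directly.
import Mathlib
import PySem

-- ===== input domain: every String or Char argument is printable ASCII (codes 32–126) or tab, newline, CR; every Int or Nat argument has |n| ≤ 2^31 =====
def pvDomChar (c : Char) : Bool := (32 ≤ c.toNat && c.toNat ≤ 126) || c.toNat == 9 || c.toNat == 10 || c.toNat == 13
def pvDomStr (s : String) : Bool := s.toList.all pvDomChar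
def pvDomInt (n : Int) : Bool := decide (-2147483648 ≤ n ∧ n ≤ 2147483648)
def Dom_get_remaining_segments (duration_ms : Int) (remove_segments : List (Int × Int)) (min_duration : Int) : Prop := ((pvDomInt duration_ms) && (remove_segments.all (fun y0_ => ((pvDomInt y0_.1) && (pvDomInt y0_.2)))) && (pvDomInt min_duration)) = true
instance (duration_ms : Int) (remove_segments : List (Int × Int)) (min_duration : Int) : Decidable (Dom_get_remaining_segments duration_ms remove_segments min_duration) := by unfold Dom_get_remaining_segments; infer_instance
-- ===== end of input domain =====

-- B fuses A's merge pass and complement pass into one sweep with a running max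
-- end, eliminating the intermediate merged list (objective: simpler; return
-- value only — neither version mutates its arguments).

-- ===== PORT A =====
def get_remaining_segments (duration_ms : Int) (remove_segments : List (Int × Int)) (min_duration : Int) : List (Int × Int) :=
  if duration_ms ≤ 0 then []
  else if remove_segments = [] then [(0, duration_ms)]
  else
    -- clip loop
    let cleaned := remove_segments.foldl (fun acc (p : Int × Int) =>
      let s := if p.1 < 0 then 0 else p.1
      let e := if p.2 > duration_ms then duration_ms else p.2
      if s < e then acc ++ [(s, e)] else acc) []
    if cleaned = [] then [(0, duration_ms)]
    else
      match PySem.List.sorted cleaned (fun seg => seg.1) with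
      | [] => [(0, duration_ms)]  -- unreachable: sorted of a nonempty list is nonempty
      | c0 :: rest =>
        -- merge loop over cleaned[1:], state (merged, cur_start, cur_end)
        let m := rest.foldl (fun (st : List (Int × Int) × Int × Int) (p : Int × Int) =>
            if p.1 ≤ st.2.2 then (st.1, st.2.1, if p.2 > st.2.2 then p.2 else st.2.2)
            else (st.1 ++ [(st.2.1, st.2.2)], p.1, p.2)) ([], c0.1, c0.2)
        let merged := m.1 ++ [(m.2.1, m.2.2)]
        -- complement loop, state (remaining, prev_end)
        let r := merged.foldl (fun (st : List (Int × Int) × Int) (p : Int × Int) =>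
            ((if p.1 - st.2 ≥ min_duration then st.1 ++ [(st.2, p.1)] else st.1), p.2)) ([], 0)
        if duration_ms - r.2 ≥ min_duration then r.1 ++ [(r.2, duration_ms)] else r.1

-- ===== PORT B =====
def get_remaining_segments_alt (duration_ms : Int) (remove_segments : List (Int × Int)) (min_duration : Int) : List (Int × Int) :=
  if duration_ms ≤ 0 then []
  else if remove_segments = [] then [(0, duration_ms)]
  else
    -- clip comprehension
    let cleaned := remove_segments.filterMap (fun (p : Int × Int) =>
      if max p.1 0 < min p.2 duration_ms then some (max p.1 0, min p.2 duration_ms) else none)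
    if cleaned = [] then [(0, duration_ms)]
    else
      match PySem.List.sorted cleaned (fun seg => seg.1) with
      | [] => [(0, duration_ms)]  -- unreachable: sorted of a nonempty list is nonempty
      | c0 :: rest =>
        let head := if c0.1 ≥ min_duration then [((0 : Int), c0.1)] else []
        -- fused sweep, state (remaining, prev = running max end)
        let st := rest.foldl (fun (st : List (Int × Int) × Int) (p : Int × Int) =>
            ((if p.1 > st.2 ∧ p.1 - st.2 ≥ min_duration then st.1 ++ [(st.2, p.1)] else st.1),
             max st.2 p.2)) (head, c0.2)
        if duration_ms - st.2 ≥ min_duration then st.1 ++ [(st.2, duration_ms)] else st.1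

-- ===== PRECONDITION & SPEC =====
def Spec_get_remaining_segments (duration_ms : Int) (remove_segments : List (Int × Int)) (min_duration : Int) (out : List (Int × Int)) : Prop := out = get_remaining_segments_alt duration_ms remove_segments min_duration
instance (duration_ms : Int) (remove_segments : List (Int × Int)) (min_duration : Int) (out : List (Int × Int)) : Decidable (Spec_get_remaining_segments duration_ms remove_segments min_duration out) := by unfold Spec_get_remaining_segments; infer_instance

-- ===== CLAIM (what is proved, stated in full; the proofs are below) =====
def Claim_equal_get_remaining_segments : Prop := ∀ (duration_ms : Int) (remove_segments : List (Int × Int)) (min_duration : Int), Dom_get_remaining_segments duration_ms remove_segments min_duration → Spec_get_remaining_segments duration_ms remove_segments min_duration (get_remaining_segments duration_ms remove_segments min_duration)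

-- ===== LEMMAS AND PROOFS =====

-- recursive reformulations of the four loops (proof-side only)
def pvMrg : Int → Int → List (Int × Int) → List (Int × Int)
  | cs, ce, [] => [(cs, ce)]
  | cs, ce, (s, e) :: t => if s ≤ ce then pvMrg cs (if e > ce then e else ce) t else (cs, ce) :: pvMrg s e t

def pvCmp (dur min : Int) : Int → List (Int × Int) → List (Int × Int)
  | prev, [] => if dur - prev ≥ min then [(prev, dur)] else []
  | prev, (s, e) :: t => (if s - prev ≥ min then [(prev, s)] else []) ++ pvCmp dur min e t

def pvAfter (dur min : Int) : Int → List (Int × Int) → List (Int × Int)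
  | ce, [] => if dur - ce ≥ min then [(ce, dur)] else []
  | ce, (s, e) :: t =>
      if s ≤ ce then pvAfter dur min (if e > ce then e else ce) t
      else (if s - ce ≥ min then [(ce, s)] else []) ++ pvAfter dur min e t

def pvSwp (dur min : Int) : Int → List (Int × Int) → List (Int × Int)
  | prev, [] => if dur - prev ≥ min then [(prev, dur)] else []
  | prev, (s, e) :: t => (if s > prev ∧ s - prev ≥ min then [(prev, s)] else []) ++ pvSwp dur min (max prev e) t

theorem pvMergeFold (rest : List (Int × Int)) : ∀ (acc : List (Int × Int)) (cs ce : Int),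
    (rest.foldl (fun (st : List (Int × Int) × Int × Int) (p : Int × Int) =>
        if p.1 ≤ st.2.2 then (st.1, st.2.1, if p.2 > st.2.2 then p.2 else st.2.2)
        else (st.1 ++ [(st.2.1, st.2.2)], p.1, p.2)) (acc, cs, ce)).1
      ++ [((rest.foldl (fun (st : List (Int × Int) × Int × Int) (p : Int × Int) =>
        if p.1 ≤ st.2.2 then (st.1, st.2.1, if p.2 > st.2.2 then p.2 else st.2.2)
        else (st.1 ++ [(st.2.1, st.2.2)], p.1, p.2)) (acc, cs, ce)).2.1,
          (rest.foldl (fun (st : List (Int × Int) × Int × Int) (p : Int × Int) =>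
        if p.1 ≤ st.2.2 then (st.1, st.2.1, if p.2 > st.2.2 then p.2 else st.2.2)
        else (st.1 ++ [(st.2.1, st.2.2)], p.1, p.2)) (acc, cs, ce)).2.2)]
    = acc ++ pvMrg cs ce rest := by
  induction rest with
  | nil => intro acc cs ce; simp [pvMrg]
  | cons p t ih =>
    intro acc cs ce
    obtain ⟨s, e⟩ := p
    simp only [List.foldl_cons, pvMrg]
    by_cases h : s ≤ ce
    · simp only [h] ; simpa using ih acc cs (if e > ce then e else ce)
    · simp only [h, if_neg, not_false_iff]
      simpa using ih (acc ++ [(cs, ce)]) s e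

theorem pvCompFold (dur min : Int) (l : List (Int × Int)) : ∀ (acc : List (Int × Int)) (prev : Int),
    (if dur - (l.foldl (fun (st : List (Int × Int) × Int) (p : Int × Int) =>
        ((if p.1 - st.2 ≥ min then st.1 ++ [(st.2, p.1)] else st.1), p.2)) (acc, prev)).2 ≥ min
     then (l.foldl (fun (st : List (Int × Int) × Int) (p : Int × Int) =>
        ((if p.1 - st.2 ≥ min then st.1 ++ [(st.2, p.1)] else st.1), p.2)) (acc, prev)).1
          ++ [((l.foldl (fun (st : List (Int × Int) × Int) (p : Int × Int) =>
        ((if p.1 - st.2 ≥ min then st.1 ++ [(st.2, p.1)] else st.1), p.2)) (acc, prev)).2, dur)]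
     else (l.foldl (fun (st : List (Int × Int) × Int) (p : Int × Int) =>
        ((if p.1 - st.2 ≥ min then st.1 ++ [(st.2, p.1)] else st.1), p.2)) (acc, prev)).1)
    = acc ++ pvCmp dur min prev l := by
  induction l with
  | nil => intro acc prev; simp [pvCmp]; split <;> simp
  | cons p t ih =>
    intro acc prev
    obtain ⟨s, e⟩ := p
    simp only [List.foldl_cons, pvCmp]
    by_cases h : s - prev ≥ min
    · simp only [h]; simpa using ih (acc ++ [(prev, s)]) e
    · simp only [h, if_neg, not_false_iff]; simpa using ih acc e

theorem pvSwpFold (dur min : Int) (rest : List (Int × Int)) : ∀ (acc : List (Int × Int)) (prev : Int),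
    (if dur - (rest.foldl (fun (st : List (Int × Int) × Int) (p : Int × Int) =>
        ((if p.1 > st.2 ∧ p.1 - st.2 ≥ min then st.1 ++ [(st.2, p.1)] else st.1), max st.2 p.2)) (acc, prev)).2 ≥ min
     then (rest.foldl (fun (st : List (Int × Int) × Int) (p : Int × Int) =>
        ((if p.1 > st.2 ∧ p.1 - st.2 ≥ min then st.1 ++ [(st.2, p.1)] else st.1), max st.2 p.2)) (acc, prev)).1
          ++ [((rest.foldl (fun (st : List (Int × Int) × Int) (p : Int × Int) =>
        ((if p.1 > st.2 ∧ p.1 - st.2 ≥ min then st.1 ++ [(st.2, p.1)] else st.1), max st.2 p.2)) (acc, prev)).2, dur)]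
     else (rest.foldl (fun (st : List (Int × Int) × Int) (p : Int × Int) =>
        ((if p.1 > st.2 ∧ p.1 - st.2 ≥ min then st.1 ++ [(st.2, p.1)] else st.1), max st.2 p.2)) (acc, prev)).1)
    = acc ++ pvSwp dur min prev rest := by
  induction rest with
  | nil => intro acc prev; simp [pvSwp]; split <;> simp
  | cons p t ih =>
    intro acc prev
    obtain ⟨s, e⟩ := p
    simp only [List.foldl_cons, pvSwp]
    by_cases h : s > prev ∧ s - prev ≥ min
    · simp only [h]; simpa using ih (acc ++ [(prev, s)]) (max prev e)
    · simp only [h, if_neg, not_false_iff]; simpa using ih acc (max prev e)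

-- complement of a merge result splits into the first gap and pvAfter
theorem pvCmp_mrg (dur min : Int) (rest : List (Int × Int)) : ∀ (prev cs ce : Int),
    pvCmp dur min prev (pvMrg cs ce rest)
      = (if cs - prev ≥ min then [(prev, cs)] else []) ++ pvAfter dur min ce rest := by
  induction rest with
  | nil => intro prev cs ce; simp [pvMrg, pvCmp, pvAfter]
  | cons p t ih =>
    intro prev cs ce
    obtain ⟨s, e⟩ := p
    simp only [pvMrg, pvAfter]
    by_cases h : s ≤ ce
    · simp only [h]; exact ih prev cs (if e > ce then e else ce)
    · simp only [h, if_neg, not_false_iff, pvCmp]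
      rw [ih ce s e]

-- the fused sweep computes pvAfter, given every interval has start ≤ end
theorem pvAfter_eq_swp (dur min : Int) (rest : List (Int × Int))
    (hle : ∀ x ∈ rest, x.1 ≤ x.2) : ∀ (ce : Int),
    pvAfter dur min ce rest = pvSwp dur min ce rest := by
  induction rest with
  | nil => intro ce; simp [pvAfter, pvSwp]
  | cons p t ih =>
    intro ce
    obtain ⟨s, e⟩ := p
    have hse : s ≤ e := hle (s, e) (List.mem_cons_self)
    have ht : ∀ x ∈ t, x.1 ≤ x.2 := fun x hx => hle x (List.mem_cons_of_mem _ hx)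
    simp only [pvAfter, pvSwp]
    by_cases h : s ≤ ce
    · have hng : ¬ (s > ce) := not_lt.mpr h
      have hmax : (if e > ce then e else ce) = max ce e := by split <;> omega
      simp only [if_pos h, hng, false_and, if_neg, not_false_iff, List.nil_append, hmax]
      exact ih ht (max ce e)
    · have hce : ce < s := not_le.mp h
      have hmax : max ce e = e := by omega
      have hgt : s > ce := hce
      by_cases hm : s - ce ≥ min
      · simp [hm, hgt, hmax, ih ht]
      · simp [hm, hgt, hmax, ih ht]

-- the two clipping passes build the same list
theorem pvClean_eq (dur : Int) (l : List (Int × Int)) : ∀ (acc : List (Int × Int)),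
    l.foldl (fun acc (p : Int × Int) =>
      let s := if p.1 < 0 then 0 else p.1
      let e := if p.2 > dur then dur else p.2
      if s < e then acc ++ [(s, e)] else acc) acc
    = acc ++ l.filterMap (fun (p : Int × Int) =>
        if max p.1 0 < min p.2 dur then some (max p.1 0, min p.2 dur) else none) := by
  induction l with
  | nil => intro acc; simp
  | cons p t ih =>
    intro acc
    obtain ⟨s, e⟩ := p
    have hs : (if s < 0 then (0 : Int) else s) = max s 0 := by split <;> omega
    have he : (if e > dur then dur else e) = min e dur := by split <;> omega
    simp only [List.foldl_cons, List.filterMap_cons, hs, he]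
    by_cases h : max s 0 < min e dur
    · simp only [h]; rw [ih]; simp
    · simp only [h, if_neg, not_false_iff]; rw [ih]

-- ===== VERDICT (by name: the statement is the Claim_ definition above) =====
theorem get_remaining_segments_spec : Claim_equal_get_remaining_segments := by
  intro dur segs md _hdom
  unfold Spec_get_remaining_segments get_remaining_segments get_remaining_segments_alt
  by_cases h1 : dur ≤ 0
  · simp [h1]
  simp only [h1, if_false]
  by_cases h2 : segs = []
  · simp [h2]
  simp only [h2, if_false]
  rw [pvClean_eq dur segs []]
  simp only [List.nil_append]
  set cleaned := segs.filterMap (fun (p : Int × Int) =>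
      if max p.1 0 < min p.2 dur then some (max p.1 0, min p.2 dur) else none) with hcl
  by_cases h3 : cleaned = []
  · simp [h3]
  simp only [h3, if_false]
  have hsn : PySem.List.sorted cleaned (fun seg => seg.1) ≠ [] := by
    intro hsnil
    exact h3 ((PySem.List.sorted_eq_nil_iff _ _ _).mp hsnil)
  obtain ⟨c0, rest, hep⟩ := List.exists_cons_of_ne_nil hsn
  obtain ⟨cs0, ce0⟩ := c0
  rw [hep]
  dsimp only
  have hle : ∀ x ∈ rest, x.1 ≤ x.2 := by
    intro x hx
    have hmem : x ∈ PySem.List.sorted cleaned (fun seg => seg.1) := by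
      rw [hep]; exact List.mem_cons_of_mem (cs0, ce0) hx
    have hxc : x ∈ cleaned := (PySem.List.mem_sorted _ _ _ _).mp hmem
    rw [hcl] at hxc
    obtain ⟨p, _hp, hif⟩ := List.mem_filterMap.mp hxc
    by_cases hc : max p.1 0 < min p.2 dur
    · simp only [hc, if_pos, Option.some_inj] at hif
      rw [← hif]; exact le_of_lt hc
    · simp [hc] at hif
  rw [pvMergeFold rest [] cs0 ce0]
  simp only [List.nil_append]
  rw [pvCompFold dur md (pvMrg cs0 ce0 rest) [] 0]
  simp only [List.nil_append]
  rw [pvCmp_mrg dur md rest 0 cs0 ce0]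
  rw [pvAfter_eq_swp dur md rest hle ce0]
  rw [pvSwpFold dur md rest (if cs0 ≥ md then [((0 : Int), cs0)] else []) ce0]
  simp [sub_zero]
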